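-- pv_equiv track=rewrite | github.com/chandan2602/kncci-qr-backend | routers/Holland_code.py | vectorize_traits
-- ===== SOURCE A (Python) =====
-- from typing import List, Dict, Any, Optional, Union
--
-- HOLLAND_CODES = ["R", "I", "A", "S", "E", "C"]
--
-- def vectorize_traits(traits: List[str]) -> dict:
--     """Converts a list of Holland Code traits into a weighted vector."""
--     vector = {code: 0 for code in HOLLAND_CODES}
--     weights = [9, 3, 1]
--     for i, trait in enumerate(traits[:3]):
--         trait_upper = trait.upper()
--         if trait_upper in vector:
--             vector[trait_upper] = weights[i]
--     return vector
-- ===== SOURCE B (Python) =====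
-- HOLLAND_CODES = ["R", "I", "A", "S", "E", "C"]
--
-- def vectorize_traits(traits):
--     """Converts a list of Holland Code traits into a weighted vector."""
--     head = [t.upper() for t in traits[:3]]
--
--     def weight(code):
--         # last match wins, so search backwards and stop at the first hit;
--         # the weight at position i is the closed form 3 ** (2 - i) = 9, 3, 1
--         for i in range(len(head) - 1, -1, -1):
--             if head[i] == code:
--                 return 3 ** (2 - i)
--         return 0
--
--     return {code: weight(code) for code in HOLLAND_CODES}
-- ===== Notes on version B (the rewrite author's own statement) =====
-- stated objective: alternative
-- what changed: B removes the dict-building write loop entirely: for each of the six codes it does a backwards early-exit linear search over the uppercased first three traits (last match wins) and computes the weight by the closed form 3**(2-i) instead of indexing a weights table.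
import Mathlib
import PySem

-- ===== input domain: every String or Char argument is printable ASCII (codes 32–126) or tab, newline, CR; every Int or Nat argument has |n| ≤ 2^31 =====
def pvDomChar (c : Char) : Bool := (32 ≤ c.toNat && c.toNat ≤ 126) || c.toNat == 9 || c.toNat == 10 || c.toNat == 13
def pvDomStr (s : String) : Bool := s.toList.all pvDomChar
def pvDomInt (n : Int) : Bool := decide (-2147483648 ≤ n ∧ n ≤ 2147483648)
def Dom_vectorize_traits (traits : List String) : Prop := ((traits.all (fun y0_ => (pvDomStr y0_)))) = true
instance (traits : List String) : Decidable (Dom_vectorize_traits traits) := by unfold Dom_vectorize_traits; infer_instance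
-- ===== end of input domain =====

-- B drops the dict entirely: for each code it searches the (≤3) uppercased traits BACKWARDS,
-- returning at the first hit with the closed-form weight 3^(2-i); objective: alternative algorithm.

def HOLLAND_CODES : List String := ["R", "I", "A", "S", "E", "C"]

-- ===== PORT A =====
def vectorize_traits (traits : List String) : List (String × Int) :=
  let vector : PySem.Dict String Int := PySem.Dict.ofList (HOLLAND_CODES.map (fun code => (code, 0)))
  let weights : List Int := [9, 3, 1]
  let final := (PySem.List.enumerate (PySem.List.slice traits none (some 3))).foldl
    (fun vector p =>
      let trait_upper := PySem.Str.upper p.2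
      -- weights[i]: i < 3 always holds (slice of length ≤ 3), so pyGetD's default is never used
      if vector.contains trait_upper then
        vector.insert trait_upper (PySem.List.pyGetD weights p.1 0)
      else vector)
    vector
  final.items

-- ===== PORT B =====
-- the backwards search loop of Source B's weight(code): first hit returns 3 ** (2 - i)
-- head[i]: i is drawn from range(len(head)-1, -1, -1), always in range, so pyGetD's default is never used;
-- 2 - i is never negative for the same reason, so the Nat exponent (3 : Int) ^ (2 - i).toNat is exact
def vtWeight (head : List String) (code : String) : List Int → Int
  | [] => 0
  | i :: rest =>
      if PySem.List.pyGetD head i "" = code then (3 : Int) ^ (2 - i).toNat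
      else vtWeight head code rest

def vectorize_traits_alt (traits : List String) : List (String × Int) :=
  let head := (PySem.List.slice traits none (some 3)).map PySem.Str.upper
  HOLLAND_CODES.map (fun code =>
    (code, vtWeight head code (PySem.List.pyRange ((head.length : Int) - 1) (-1) (-1))))

-- ===== PRECONDITION & SPEC =====
def Spec_vectorize_traits (traits : List String) (out : List (String × Int)) : Prop := out = vectorize_traits_alt traits
instance (traits : List String) (out : List (String × Int)) : Decidable (Spec_vectorize_traits traits out) := by unfold Spec_vectorize_traits; infer_instance

-- ===== CLAIM (what is proved, stated in full; the proofs are below) =====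
def Claim_equal_vectorize_traits : Prop := ∀ (traits : List String), Dom_vectorize_traits traits → Spec_vectorize_traits traits (vectorize_traits traits)

-- ===== LEMMAS AND PROOFS =====

-- the "last index whose uppercased trait equals k" fold: common characterisation of both sides
def lastIdxF (k : String) : Option Int → Int × String → Option Int :=
  fun a p => if PySem.Str.upper p.2 = k then some p.1 else a

theorem lastIdx_acc (k : String) (e : List (Int × String)) (a : Option Int) :
    e.foldl (lastIdxF k) a = (e.foldl (lastIdxF k) none).elim a some := by
  induction e generalizing a with
  | nil => simp
  | cons q rest ih =>
    simp only [List.foldl_cons]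
    rw [ih (lastIdxF k a q), ih (lastIdxF k none q)]
    cases h : rest.foldl (lastIdxF k) none with
    | some i => simp
    | none =>
      simp only [Option.elim]
      unfold lastIdxF
      split <;> simp

-- A's loop keeps the key set unchanged
theorem foldA_keys (e : List (Int × String)) (d : PySem.Dict String Int) :
    (e.foldl (fun d p =>
      if d.contains (PySem.Str.upper p.2) then
        d.insert (PySem.Str.upper p.2) (PySem.List.pyGetD [9, 3, 1] p.1 0)
      else d) d).keys = d.keys := by
  induction e generalizing d with
  | nil => rfl
  | cons q rest ih =>
    simp only [List.foldl_cons]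
    rw [ih]
    split
    · rename_i hc
      exact PySem.Dict.keys_insert_of_contains _ _ hc
    · rfl

-- A's final value at a contained key is the weight of the LAST matching index
theorem foldA_getD (e : List (Int × String)) (d : PySem.Dict String Int) (k : String)
    (hk : d.contains k = true) :
    (e.foldl (fun d p =>
      if d.contains (PySem.Str.upper p.2) then
        d.insert (PySem.Str.upper p.2) (PySem.List.pyGetD [9, 3, 1] p.1 0)
      else d) d).getD k 0
      = (e.foldl (lastIdxF k) none).elim (d.getD k 0)
          (fun i => PySem.List.pyGetD [9, 3, 1] i 0) := by
  induction e generalizing d with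
  | nil => simp
  | cons q rest ih =>
    simp only [List.foldl_cons]
    have hk' : (if d.contains (PySem.Str.upper q.2) then
        d.insert (PySem.Str.upper q.2) (PySem.List.pyGetD [9, 3, 1] q.1 0)
      else d).contains k = true := by
      split
      · rw [PySem.Dict.contains_insert]; simp [hk]
      · exact hk
    rw [ih _ hk', lastIdx_acc k rest (lastIdxF k none q)]
    cases h : rest.foldl (lastIdxF k) none with
    | some i => simp
    | none =>
      unfold lastIdxF
      by_cases hq : PySem.Str.upper q.2 = k
      · rw [if_pos hq, hq, if_pos hk]
        simp [PySem.Dict.getD_insert_self]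
      · rw [if_neg hq]
        simp only [Option.elim]
        split
        · rw [PySem.Dict.getD_insert_of_ne _ _ _ (Ne.symm hq)]
        · rfl

-- B's backwards search computes the same "last matching index" weight (lists of length ≤ 3)
theorem vtWeight_eq_lastIdx (xs : List String) (k : String) (h : xs.length ≤ 3) :
    vtWeight (xs.map PySem.Str.upper) k
        (PySem.List.pyRange (((xs.map PySem.Str.upper).length : Int) - 1) (-1) (-1))
      = ((PySem.List.enumerate xs).foldl (lastIdxF k) none).elim 0
          (fun i => PySem.List.pyGetD [9, 3, 1] i 0) := by
  have h1 : PySem.List.pyRange 0 (-1) (-1) = [0] := by decide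
  have h2 : PySem.List.pyRange 1 (-1) (-1) = [1, 0] := by decide
  have h3 : PySem.List.pyRange 2 (-1) (-1) = [2, 1, 0] := by decide
  match xs, h with
  | [], _ =>
      simp [vtWeight, PySem.List.pyRange_neg_one_eq_nil, PySem.List.enumerate_nil]
  | [a], _ =>
      have hr : ((([a].map PySem.Str.upper).length : Int) - 1) = 0 := by simp
      rw [hr, h1]
      simp only [PySem.List.enumerate_cons, PySem.List.enumerate_nil, List.foldl, List.map]
      simp only [vtWeight, lastIdxF, PySem.List.pyGetD]
      split_ifs <;> simp_all
  | [a, b], _ =>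
      have hr : ((([a, b].map PySem.Str.upper).length : Int) - 1) = 1 := by simp
      rw [hr, h2]
      simp only [PySem.List.enumerate_cons, PySem.List.enumerate_nil, List.foldl, List.map]
      simp only [vtWeight, lastIdxF, PySem.List.pyGetD]
      split_ifs <;> simp_all
  | [a, b, c], _ =>
      have hr : ((([a, b, c].map PySem.Str.upper).length : Int) - 1) = 2 := by simp
      rw [hr, h3]
      simp only [PySem.List.enumerate_cons, PySem.List.enumerate_nil, List.foldl, List.map]
      simp only [vtWeight, lastIdxF, PySem.List.pyGetD]
      split_ifs <;> simp_all

-- the six literal codes are keys of the initial vector, with value 0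
def pvD0 : PySem.Dict String Int := PySem.Dict.ofList (HOLLAND_CODES.map (fun code => (code, 0)))

theorem pvD0_contains (k : String) (hk : k ∈ HOLLAND_CODES) : pvD0.contains k = true := by
  fin_cases hk <;> decide

theorem pvD0_items_zero : ∀ p ∈ pvD0.items, p.2 = (0 : Int) := by decide

theorem pvD0_getD (k : String) : pvD0.getD k 0 = 0 := by
  rw [PySem.Dict.getD_eq_get?_getD]
  cases hg : pvD0.get? k with
  | none => rfl
  | some v =>
    have hm := PySem.Dict.mem_items_of_get?_eq_some _ hg
    have := pvD0_items_zero _ hm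
    simp_all

theorem pvD0_keys : pvD0.keys = HOLLAND_CODES := by decide

theorem pvD0_keys_nodup : pvD0.keys.Nodup := by decide

-- ===== VERDICT (by name: the statement is the Claim_ definition above) =====
theorem vectorize_traits_spec : Claim_equal_vectorize_traits := by
  intro traits _
  unfold Spec_vectorize_traits vectorize_traits vectorize_traits_alt
  simp only []
  have hd0 : PySem.Dict.ofList (HOLLAND_CODES.map (fun code => (code, 0))) = pvD0 := rfl
  rw [hd0]
  have hsl : PySem.List.slice traits none (some 3) = traits.take 3 := by
    simpa using PySem.List.slice_to_natCast traits 3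
  rw [hsl]
  set e := PySem.List.enumerate (traits.take 3) with he
  have hkeys := foldA_keys e pvD0
  have hnodup : (e.foldl (fun d p =>
      if d.contains (PySem.Str.upper p.2) then
        d.insert (PySem.Str.upper p.2) (PySem.List.pyGetD [9, 3, 1] p.1 0)
      else d) pvD0).keys.Nodup := by rw [hkeys]; exact pvD0_keys_nodup
  rw [PySem.Dict.items_eq_map_keys _ hnodup 0, hkeys, pvD0_keys]
  apply List.map_congr_left
  intro k hk
  have hA := foldA_getD e pvD0 k (pvD0_contains k hk)
  rw [pvD0_getD] at hA
  rw [hA, he]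
  exact congrArg (fun v => (k, v))
    (vtWeight_eq_lastIdx (traits.take 3) k (by simp)).symm
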